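-- pv_equiv track=rewrite | github.com/major-lab/RNA2D | python3/rna_2d/src/script.py | split_jobs
-- ===== SOURCE A (Python) =====
-- CHUNK_SIZE = 10  # size of process jobs
--
-- def split_jobs(array):
--     """creates an array of arrays for the positions over which to start"""
--     num_of_jobs = len(array) // CHUNK_SIZE
--     residual = len(array) % CHUNK_SIZE
--     result = [[i for i in range(
--         CHUNK_SIZE * x, CHUNK_SIZE * x + CHUNK_SIZE)] for x in range(
--             0, num_of_jobs)]
--     if residual != 0:
--         result.append([i for i in range(num_of_jobs * CHUNK_SIZE, len(array))])
--     return result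
-- ===== SOURCE B (Python) =====
-- CHUNK_SIZE = 10  # size of process jobs
--
-- def split_jobs(array):
--     """creates an array of arrays for the positions over which to start"""
--     result = []
--     chunk = []
--     for i in range(len(array)):
--         chunk.append(i)
--         if len(chunk) == CHUNK_SIZE:
--             result.append(chunk)
--             chunk = []
--     if chunk:
--         result.append(chunk)
--     return result
-- ===== Notes on version B (the rewrite author's own statement) =====
-- stated objective: alternative
-- what changed: B streams over the positions once, accumulating a current chunk and flushing it whenever it reaches CHUNK_SIZE, instead of A's arithmetic construction of each chunk from quotient/remainder with a nested range comprehension and a separate residual branch.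
import Mathlib
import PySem

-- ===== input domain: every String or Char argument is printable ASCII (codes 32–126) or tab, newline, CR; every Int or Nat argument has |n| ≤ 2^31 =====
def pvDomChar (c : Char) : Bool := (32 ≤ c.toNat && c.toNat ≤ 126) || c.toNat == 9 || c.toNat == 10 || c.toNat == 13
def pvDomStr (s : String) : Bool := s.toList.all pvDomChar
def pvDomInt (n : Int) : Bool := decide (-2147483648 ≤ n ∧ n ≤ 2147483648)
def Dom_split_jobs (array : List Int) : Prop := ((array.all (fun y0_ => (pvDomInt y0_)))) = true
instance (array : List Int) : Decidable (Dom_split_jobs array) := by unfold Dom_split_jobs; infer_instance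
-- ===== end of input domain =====

-- B streams over the positions once, flushing an accumulated chunk whenever it
-- reaches CHUNK_SIZE, instead of A's quotient/remainder arithmetic per chunk with
-- a residual branch (alternative decomposition, same cost).

-- ===== PORT A =====
def CHUNK_SIZE : Int := 10

def split_jobs (array : List Int) : List (List Int) :=
  let num_of_jobs : Int := PySem.Int.floordiv (array.length : Int) CHUNK_SIZE
  let residual : Int := PySem.Int.mod (array.length : Int) CHUNK_SIZE
  let result : List (List Int) :=
    (PySem.List.pyRange 0 num_of_jobs 1).map
      (fun x => PySem.List.pyRange (CHUNK_SIZE * x) (CHUNK_SIZE * x + CHUNK_SIZE) 1)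
  if residual ≠ 0 then
    result ++ [PySem.List.pyRange (num_of_jobs * CHUNK_SIZE) (array.length : Int) 1]
  else result

-- ===== PORT B =====
-- the loop body of Source B: append i to the current chunk, flush it at CHUNK_SIZE
def sjStep (st : List (List Int) × List Int) (i : Int) : List (List Int) × List Int :=
  let chunk := st.2 ++ [i]
  if (chunk.length : Int) = CHUNK_SIZE then (st.1 ++ [chunk], []) else (st.1, chunk)

def split_jobs_alt (array : List Int) : List (List Int) :=
  let st := (PySem.List.pyRange 0 (array.length : Int) 1).foldl sjStep ([], [])
  if st.2 ≠ [] then st.1 ++ [st.2] else st.1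

-- ===== PRECONDITION & SPEC =====
def Spec_split_jobs (array : List Int) (out : List (List Int)) : Prop := out = split_jobs_alt array
instance (array : List Int) (out : List (List Int)) : Decidable (Spec_split_jobs array out) := by unfold Spec_split_jobs; infer_instance

-- ===== CLAIM (what is proved, stated in full; the proofs are below) =====
def Claim_equal_split_jobs : Prop := ∀ (array : List Int), Dom_split_jobs array → Spec_split_jobs array (split_jobs array)

-- ===== LEMMAS AND PROOFS =====

-- loop invariant: after the first m positions, the flushed chunks are the full
-- blocks of ten and the current chunk is the residual tail of positions
theorem foldl_sjStep : ∀ (m : Nat),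
    (PySem.List.pyRange 0 (m : Int) 1).foldl sjStep ([], [])
      = ((List.range (m / 10)).map
            (fun (k : Nat) => PySem.List.pyRange (10 * (k : Int)) (10 * (k : Int) + 10) 1),
         PySem.List.pyRange (10 * ((m / 10 : Nat) : Int)) (m : Int) 1) := by
  intro m
  induction m with
  | zero =>
    rw [PySem.List.pyRange_one_eq_nil (by norm_num), PySem.List.pyRange_one_eq_nil (by norm_num)]
    simp [List.foldl]
  | succ m ih =>
    have hcast : ((m + 1 : Nat) : Int) = (m : Int) + 1 := by push_cast; ring
    have hq10 : 10 * (m / 10) ≤ m := by omega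
    rw [hcast, PySem.List.pyRange_one_succ_right (by exact_mod_cast Nat.zero_le m),
        List.foldl_append, ih]
    simp only [List.foldl]
    unfold sjStep
    simp only []
    have hchunk : PySem.List.pyRange (10 * ((m / 10 : Nat) : Int)) (m : Int) 1 ++ [(m : Int)]
        = PySem.List.pyRange (10 * ((m / 10 : Nat) : Int)) ((m : Int) + 1) 1 := by
      rw [PySem.List.pyRange_one_succ_right]
      exact_mod_cast hq10
    rw [hchunk]
    have hlen : ((PySem.List.pyRange (10 * ((m / 10 : Nat) : Int)) ((m : Int) + 1) 1).length : Int)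
        = (m : Int) + 1 - 10 * ((m / 10 : Nat) : Int) := by
      rw [PySem.List.length_pyRange_one]
      have := Nat.mul_div_le m 10
      push_cast
      omega
    by_cases hfull : m % 10 = 9
    · have hcond : ((PySem.List.pyRange (10 * ((m / 10 : Nat) : Int)) ((m : Int) + 1) 1).length : Int)
          = CHUNK_SIZE := by
        rw [hlen]
        have := Nat.div_add_mod m 10
        unfold CHUNK_SIZE
        push_cast
        omega
      rw [if_pos hcond]
      have hdiv : (m + 1) / 10 = m / 10 + 1 := by omega
      rw [hdiv, List.range_succ, List.map_append, List.map_cons, List.map_nil]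
      simp only [Prod.mk.injEq]
      refine ⟨?_, ?_⟩
      · have h1 : (10 : Int) * ((m / 10 : Nat) : Int) + 10 = (m : Int) + 1 := by
          have := Nat.div_add_mod m 10
          push_cast
          omega
        rw [h1]
      · refine (PySem.List.pyRange_one_eq_nil ?_).symm
        have := Nat.div_add_mod m 10
        push_cast
        omega
    · have hcond : ¬ ((PySem.List.pyRange (10 * ((m / 10 : Nat) : Int)) ((m : Int) + 1) 1).length : Int)
          = CHUNK_SIZE := by
        rw [hlen]
        have := Nat.div_add_mod m 10
        unfold CHUNK_SIZE
        push_cast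
        omega
      rw [if_neg hcond]
      have hdiv : (m + 1) / 10 = m / 10 := by omega
      rw [hdiv]

theorem split_jobs_eq_alt (array : List Int) : split_jobs array = split_jobs_alt array := by
  unfold split_jobs split_jobs_alt CHUNK_SIZE
  simp only []
  set N := array.length with hN
  have hq : PySem.Int.floordiv (N : Int) 10 = ((N / 10 : Nat) : Int) := by
    exact_mod_cast PySem.Int.floordiv_natCast N 10
  have hr : PySem.Int.mod (N : Int) 10 = ((N % 10 : Nat) : Int) := by
    exact_mod_cast PySem.Int.mod_natCast N 10
  rw [hq, hr, PySem.List.pyRange_zero_natCast, List.map_map, foldl_sjStep N]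
  have hq10 : 10 * (N / 10) ≤ N := Nat.mul_div_le N 10
  by_cases h0 : N % 10 = 0
  · have hnil : PySem.List.pyRange (10 * ((N / 10 : Nat) : Int)) (N : Int) 1 = [] := by
      apply PySem.List.pyRange_one_eq_nil
      have := Nat.div_add_mod N 10
      push_cast
      omega
    have hres : ¬ ((N % 10 : Nat) : Int) ≠ 0 := by
      simp [h0]
    rw [if_neg hres, hnil]
    simp only [ne_eq, not_true_eq_false, ite_false]
    apply List.map_congr_left
    intro k _
    simp [Function.comp]
  · have hne : PySem.List.pyRange (10 * ((N / 10 : Nat) : Int)) (N : Int) 1 ≠ [] := by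
      apply List.ne_nil_of_length_pos
      rw [PySem.List.length_pyRange_one]
      have := Nat.div_add_mod N 10
      omega
    have hres : ((N % 10 : Nat) : Int) ≠ 0 := by exact_mod_cast h0
    rw [if_pos hres, if_pos hne]
    have hcomm : ((N / 10 : Nat) : Int) * 10 = 10 * ((N / 10 : Nat) : Int) := mul_comm _ _
    rw [hcomm]
    rfl

-- ===== VERDICT (by name: the statement is the Claim_ definition above) =====
theorem split_jobs_spec : Claim_equal_split_jobs := by
  intro array _
  unfold Spec_split_jobs
  exact split_jobs_eq_alt array
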